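-- pv_equiv track=rewrite | github.com/santi-vazquez/color_code | encoder.py | string_to_bit
-- ===== SOURCE A (Python) =====
-- def string_to_bit(message: str):
--     code = []
--     for char in message:
--         num = ord(char)
--         bin_num = f"{num:08b}"
--         for i in range(0, 8, 2):
--             code.append(bin_num[i : i + 2])
--     code.extend(["00", "00", "00", "00"])
--     return code
-- ===== SOURCE B (Python) =====
-- _Q = ("00", "01", "10", "11")
--
-- def string_to_bit(message: str):
--     code = []
--     for char in message:
--         n = ord(char)
--         quads = []
--         for _ in range(4):
--             n, r = divmod(n, 4)
--             quads.append(_Q[r])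
--         code += reversed(quads)
--     code += ["00"] * 4
--     return code
-- ===== Notes on version B (the rewrite author's own statement) =====
-- stated objective: alternative
-- what changed: B never formats or slices bit-strings: it extracts each character code's four base-4 digits arithmetically with repeated divmod (least-significant first), maps each digit through a fixed 4-entry lookup table of 2-bit strings, and reverses the per-character digit list before appending.
import Mathlib
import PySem

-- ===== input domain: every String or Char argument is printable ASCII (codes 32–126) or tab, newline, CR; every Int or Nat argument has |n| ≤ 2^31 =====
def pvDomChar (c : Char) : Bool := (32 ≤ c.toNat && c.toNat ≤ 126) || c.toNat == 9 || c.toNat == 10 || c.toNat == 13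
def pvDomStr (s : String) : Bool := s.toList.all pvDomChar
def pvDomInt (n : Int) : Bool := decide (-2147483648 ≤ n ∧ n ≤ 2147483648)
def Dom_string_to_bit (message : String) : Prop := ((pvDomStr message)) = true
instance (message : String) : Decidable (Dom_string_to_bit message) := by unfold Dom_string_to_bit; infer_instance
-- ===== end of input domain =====

-- B replaces A's binary formatting + slicing with arithmetic base-4 digit extraction
-- (divmod, least-significant first, then reverse) through a 4-entry lookup table;
-- objective: alternative algorithm, same cost.

-- ===== PORT A =====
-- f"{n:08b}" for 0 ≤ n < 256: the 8-bit zero-padded binary string as a char list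
-- (exact on the stated domain, where every character code is ≤ 126).
def pvBit (n k : Nat) : Char := if n / 2 ^ k % 2 = 1 then '1' else '0'
def pvBin8 (n : Nat) : List Char :=
  [pvBit n 7, pvBit n 6, pvBit n 5, pvBit n 4, pvBit n 3, pvBit n 2, pvBit n 1, pvBit n 0]

def string_to_bit (message : String) : List String :=
  let code : List String := []
  let code := message.toList.foldl (fun code char =>
    let num := char.toNat
    let bin_num := pvBin8 num
    (PySem.List.pyRange 0 8 2).foldl (fun code i =>
      -- bin_num[i : i + 2]: the string slice, ported on the char list (exact)
      code ++ [String.ofList (PySem.List.slice bin_num (some i) (some (i + 2)))]) code) code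
  code ++ ["00", "00", "00", "00"]

-- ===== PORT B =====
-- _Q = ("00", "01", "10", "11"): tuple indexing by a digit 0..3
def pvQ (r : Nat) : String :=
  match r with
  | 0 => "00" | 1 => "01" | 2 => "10" | _ => "11"

def string_to_bit_alt (message : String) : List String :=
  let code : List String := []
  let code := message.toList.foldl (fun code char =>
    let n := char.toNat
    -- quads = []; for _ in range(4): n, r = divmod(n, 4); quads.append(_Q[r])
    let p := (List.range 4).foldl
      (fun (p : Nat × List String) _ => (p.1 / 4, p.2 ++ [pvQ (p.1 % 4)])) (n, [])
    -- code += reversed(quads)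
    code ++ p.2.reverse) code
  code ++ ["00", "00", "00", "00"]

-- ===== PRECONDITION & SPEC =====
def Spec_string_to_bit (message : String) (out : List String) : Prop := out = string_to_bit_alt message
instance (message : String) (out : List String) : Decidable (Spec_string_to_bit message out) := by unfold Spec_string_to_bit; infer_instance

-- ===== CLAIM =====
def Claim_equal_string_to_bit : Prop := ∀ (message : String), Dom_string_to_bit message → Spec_string_to_bit message (string_to_bit message)

-- ===== LEMMAS AND PROOFS =====

-- the four 2-bit chunks of one character's 8-bit string, as A produces them
def pvChunk4 (n : Nat) : List String :=
  [String.ofList [pvBit n 7, pvBit n 6], String.ofList [pvBit n 5, pvBit n 4],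
   String.ofList [pvBit n 3, pvBit n 2], String.ofList [pvBit n 1, pvBit n 0]]

-- the four base-4 digit strings of one character's code, as B produces them
def pvQuads (n : Nat) : List String :=
  [pvQ (n / 64 % 4), pvQ (n / 16 % 4), pvQ (n / 4 % 4), pvQ (n % 4)]

lemma pyRange08 : PySem.List.pyRange 0 8 2 = [0, 2, 4, 6] := by decide

lemma inner_eq_A (n : Nat) (code : List String) :
    (PySem.List.pyRange 0 8 2).foldl (fun code i =>
      code ++ [String.ofList (PySem.List.slice (pvBin8 n) (some i) (some (i + 2)))]) code
    = code ++ pvChunk4 n := by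
  rw [pyRange08]
  simp [List.foldl, PySem.List.slice, PySem.List.clampIdx, pvBin8, pvChunk4]

lemma A_loop_eq (cs : List Char) (code : List String) :
    cs.foldl (fun code char =>
      (PySem.List.pyRange 0 8 2).foldl (fun code i =>
        code ++ [String.ofList (PySem.List.slice (pvBin8 char.toNat) (some i) (some (i + 2)))]) code) code
    = code ++ cs.flatMap (fun c => pvChunk4 c.toNat) := by
  induction cs generalizing code with
  | nil => simp
  | cons c t ih =>
    simp only [List.foldl_cons]
    rw [inner_eq_A, ih, List.flatMap_cons, ← List.append_assoc]

lemma inner_eq_B (n : Nat) (code : List String) :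
    code ++ ((List.range 4).foldl
      (fun (p : Nat × List String) _ => (p.1 / 4, p.2 ++ [pvQ (p.1 % 4)])) (n, [])).2.reverse
    = code ++ pvQuads n := by
  have h4 : List.range 4 = [0, 1, 2, 3] := by decide
  rw [h4]
  simp only [List.foldl_cons, List.foldl_nil]
  simp [pvQuads, Nat.div_div_eq_div_mul]

lemma B_loop_eq (cs : List Char) (code : List String) :
    cs.foldl (fun code char =>
      code ++ ((List.range 4).foldl
        (fun (p : Nat × List String) _ => (p.1 / 4, p.2 ++ [pvQ (p.1 % 4)])) (char.toNat, [])).2.reverse) code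
    = code ++ cs.flatMap (fun c => pvQuads c.toNat) := by
  induction cs generalizing code with
  | nil => simp
  | cons c t ih =>
    simp only [List.foldl_cons]
    rw [inner_eq_B, ih, List.flatMap_cons, ← List.append_assoc]

set_option maxRecDepth 4000 in
lemma chunk_eq_quads : ∀ n < 256, pvChunk4 n = pvQuads n := by decide

lemma flatMap_eq (cs : List Char) (h : cs.all pvDomChar = true) :
    cs.flatMap (fun c => pvChunk4 c.toNat) = cs.flatMap (fun c => pvQuads c.toNat) := by
  induction cs with
  | nil => rfl
  | cons c t ih =>
    simp only [List.all_cons, Bool.and_eq_true] at h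
    have hc : c.toNat < 256 := by
      have := h.1
      simp [pvDomChar] at this
      omega
    rw [List.flatMap_cons, List.flatMap_cons, chunk_eq_quads _ hc, ih h.2]

-- ===== VERDICT =====
theorem string_to_bit_spec : Claim_equal_string_to_bit := by
  intro message hdom
  unfold Spec_string_to_bit string_to_bit string_to_bit_alt
  dsimp only
  rw [A_loop_eq, B_loop_eq, flatMap_eq message.toList hdom]
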